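-- pv_equiv track=rewrite | github.com/damoke012/dareoke | forge-cognition-prototype/benchmark/benchmark_llm.py | _get_test_prompts
-- ===== SOURCE A (Python) =====
-- from typing import List, Optional
--
-- def _get_test_prompts(count: int) -> List[str]:
--     """Generate test prompts."""
--     base_prompts = [
--         "What is predictive maintenance and how does it work?",
--         "Explain the concept of machine learning in simple terms.",
--         "How do neural networks process information?",
--         "What are the benefits of edge computing for industrial applications?",
--         "Describe the key components of a building automation system.",
--         "What is the difference between supervised and unsupervised learning?",
--         "How can AI improve energy efficiency in buildings?",
--         "What are the main challenges in deploying AI at the edge?",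
--         "Explain the concept of digital twins in manufacturing.",
--         "What is the role of sensors in IoT systems?",
--     ]
--
--     prompts = []
--     for i in range(count):
--         prompts.append(base_prompts[i % len(base_prompts)])
--     return prompts
-- ===== SOURCE B (Python) =====
-- from typing import List
--
--
-- def _get_test_prompts(count: int) -> List[str]:
--     """Generate test prompts."""
--     base_prompts = [
--         "What is predictive maintenance and how does it work?",
--         "Explain the concept of machine learning in simple terms.",
--         "How do neural networks process information?",
--         "What are the benefits of edge computing for industrial applications?",
--         "Describe the key components of a building automation system.",
--         "What is the difference between supervised and unsupervised learning?",
--         "How can AI improve energy efficiency in buildings?",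
--         "What are the main challenges in deploying AI at the edge?",
--         "Explain the concept of digital twins in manufacturing.",
--         "What is the role of sensors in IoT systems?",
--     ]
--     n = max(count, 0)
--     q, r = divmod(n, len(base_prompts))
--     return base_prompts * q + base_prompts[:r]
-- ===== Notes on version B (the rewrite author's own statement) =====
-- stated objective: simpler
-- what changed: Replaces the count-iteration append loop with modulo lookups by a closed-form construction: divmod(count,10) gives q full copies via list multiplication plus a remainder slice.
import Mathlib
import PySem

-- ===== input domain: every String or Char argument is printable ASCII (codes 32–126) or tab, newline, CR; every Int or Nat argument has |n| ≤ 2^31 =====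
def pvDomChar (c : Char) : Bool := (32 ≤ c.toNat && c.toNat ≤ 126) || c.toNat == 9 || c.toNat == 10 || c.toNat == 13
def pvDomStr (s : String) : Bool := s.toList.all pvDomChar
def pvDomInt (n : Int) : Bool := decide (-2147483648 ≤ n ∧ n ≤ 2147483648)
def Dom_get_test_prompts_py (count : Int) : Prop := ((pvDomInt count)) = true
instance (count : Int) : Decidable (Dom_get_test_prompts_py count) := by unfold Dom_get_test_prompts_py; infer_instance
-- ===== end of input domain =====

-- B builds the result in closed form (q whole copies + a remainder prefix) instead of appending one element per loop index; objective: simpler.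

-- ===== PORT A =====
def basePromptsA : List String :=
  [ "What is predictive maintenance and how does it work?",
    "Explain the concept of machine learning in simple terms.",
    "How do neural networks process information?",
    "What are the benefits of edge computing for industrial applications?",
    "Describe the key components of a building automation system.",
    "What is the difference between supervised and unsupervised learning?",
    "How can AI improve energy efficiency in buildings?",
    "What are the main challenges in deploying AI at the edge?",
    "Explain the concept of digital twins in manufacturing.",
    "What is the role of sensors in IoT systems?" ]

def get_test_prompts_py (count : Int) : List String :=
  (PySem.List.pyRange 0 count 1).foldl
    (fun prompts i =>
      prompts ++ [PySem.List.pyGetD basePromptsA (PySem.Int.mod i (basePromptsA.length : Int)) ""])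
    []

-- ===== PORT B =====
def basePromptsB : List String :=
  [ "What is predictive maintenance and how does it work?",
    "Explain the concept of machine learning in simple terms.",
    "How do neural networks process information?",
    "What are the benefits of edge computing for industrial applications?",
    "Describe the key components of a building automation system.",
    "What is the difference between supervised and unsupervised learning?",
    "How can AI improve energy efficiency in buildings?",
    "What are the main challenges in deploying AI at the edge?",
    "Explain the concept of digital twins in manufacturing.",
    "What is the role of sensors in IoT systems?" ]

def get_test_prompts_py_alt (count : Int) : List String :=
  let n : Int := max count 0
  let q : Int := PySem.Int.floordiv n (basePromptsB.length : Int)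
  let r : Int := PySem.Int.mod n (basePromptsB.length : Int)
  (List.replicate q.toNat basePromptsB).flatten ++ PySem.List.slice basePromptsB none (some r)

-- ===== PRECONDITION & SPEC =====
def Spec_get_test_prompts_py (count : Int) (out : List String) : Prop := out = get_test_prompts_py_alt count
instance (count : Int) (out : List String) : Decidable (Spec_get_test_prompts_py count out) := by unfold Spec_get_test_prompts_py; infer_instance

-- ===== CLAIM (what is proved, stated in full; the proofs are below) =====
def Claim_equal_get_test_prompts_py : Prop := ∀ (count : Int), Dom_get_test_prompts_py count → Spec_get_test_prompts_py count (get_test_prompts_py count)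

-- ===== LEMMAS AND PROOFS =====

-- A's loop value for a Nat bound, in closed form.
theorem aLoop_closed (n : Nat) :
    (PySem.List.pyRange 0 (n : Int) 1).foldl
      (fun prompts i =>
        prompts ++ [PySem.List.pyGetD basePromptsA (PySem.Int.mod i (basePromptsA.length : Int)) ""])
      []
    = (List.replicate (n / 10) basePromptsA).flatten ++ basePromptsA.take (n % 10) := by
  induction n with
  | zero => simp [PySem.List.pyRange_one_eq_nil]
  | succ m ih =>
    have hcast : ((m + 1 : Nat) : Int) = (m : Int) + 1 := by push_cast; ring
    rw [hcast, PySem.List.pyRange_one_succ_right (by positivity), List.foldl_append, ih]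
    simp only [List.foldl_cons, List.foldl_nil]
    have hlen : (basePromptsA.length : Int) = (10 : Int) := rfl
    have hmod : PySem.Int.mod (m : Int) (basePromptsA.length : Int) = ((m % 10 : Nat) : Int) := by
      rw [hlen]
      exact_mod_cast PySem.Int.mod_natCast m 10
    have hget : PySem.List.pyGetD basePromptsA
        (PySem.Int.mod (m : Int) (basePromptsA.length : Int)) "" = basePromptsA[m % 10]'(by
          have : m % 10 < 10 := Nat.mod_lt _ (by omega)
          simpa [basePromptsA] using this) := by
      rw [hmod, PySem.List.pyGetD_natCast]
      exact List.getD_eq_getElem _ _ _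
    rw [hget]
    have hr : m % 10 < 10 := Nat.mod_lt _ (by omega)
    have htake : basePromptsA.take (m % 10) ++ [basePromptsA[m % 10]'(by
        have : m % 10 < 10 := hr
        simpa [basePromptsA] using this)]
        = basePromptsA.take (m % 10 + 1) := by
      rw [List.take_add_one]
      congr 1
      rw [List.getElem?_eq_getElem (by simpa [basePromptsA] using hr)]
      rfl
    rcases Nat.lt_or_ge (m % 10) 9 with h9 | h9
    · have hdiv : (m + 1) / 10 = m / 10 := by omega
      have hmod1 : (m + 1) % 10 = m % 10 + 1 := by omega
      rw [hdiv, hmod1, List.append_assoc, htake]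
    · have h9' : m % 10 = 9 := by omega
      have hdiv : (m + 1) / 10 = m / 10 + 1 := by omega
      have hmod1 : (m + 1) % 10 = 0 := by omega
      rw [hdiv, hmod1, List.append_assoc, htake, h9']
      have hfull : basePromptsA.take (9 + 1) = basePromptsA := rfl
      rw [hfull, List.replicate_succ', List.flatten_append]
      simp

-- ===== VERDICT (by name: the statement is the Claim_ definition above) =====
theorem get_test_prompts_py_spec : Claim_equal_get_test_prompts_py := by
  intro count _
  show get_test_prompts_py count = get_test_prompts_py_alt count
  unfold get_test_prompts_py get_test_prompts_py_alt
  have hBA : basePromptsB = basePromptsA := rfl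
  have hmax : max count 0 = ((count.toNat : Nat) : Int) := (Int.ofNat_toNat count).symm
  have hrange : PySem.List.pyRange 0 count 1 = PySem.List.pyRange 0 ((count.toNat : Nat) : Int) 1 := by
    rcases Int.lt_or_le count 0 with h | h
    · rw [PySem.List.pyRange_one_eq_nil (by omega), PySem.List.pyRange_one_eq_nil (by omega)]
    · rw [Int.toNat_of_nonneg h]
  rw [hrange, aLoop_closed, hBA, hmax]
  have hlen : (basePromptsA.length : Int) = ((10 : Nat) : Int) := rfl
  rw [hlen]
  simp only [PySem.Int.floordiv_natCast, PySem.Int.mod_natCast,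
    PySem.List.slice_to_natCast, Int.toNat_natCast]
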